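-- pv_equiv track=rewrite | github.com/iiimj4everiii/LeetCode | Groupings/source.py | dfs
-- ===== SOURCE A (Python) =====
-- def dfs(graph, current_node, visited:set, node_a, node_b):
--
--     if current_node in visited:
--         return False
--
--     visited.add(current_node)
--     if node_a in visited and node_b in visited:
--         return True
--
--     adj_list = graph[current_node]
--     for adj in adj_list:
--         if dfs(graph, adj, visited, node_a, node_b):
--             return True
--
--     return False
-- ===== SOURCE B (Python) =====
-- def dfs(graph, current_node, visited: set, node_a, node_b):
--     # Iterative DFS with an explicit stack instead of recursion.
--     # Pushing neighbors in reversed order keeps A's exact preorder visit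
--     # sequence, so `visited` is mutated identically and the early True
--     # fires at the same moment.
--     stack = [current_node]
--     while stack:
--         node = stack.pop()
--         if node in visited:
--             continue
--         visited.add(node)
--         if node_a in visited and node_b in visited:
--             return True
--         adj_list = graph[node]
--         stack.extend(reversed(adj_list))
--     return False
-- ===== Notes on version B (the rewrite author's own statement) =====
-- stated objective: alternative
-- what changed: Replaces A's recursive DFS (early-return propagated through nested calls) by an iterative DFS over an explicit stack with a pop-time visited guard and reversed neighbor pushes, preserving A's exact preorder visit sequence.
-- outside the precondition, e.g. on dfs({0: [], 1: [2]}, 0, set(), 5, 5): A returns False, B returns False; on dfs({0: [9]}, 0, {9}, 1, 1): A returns False, B returns False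
import Mathlib
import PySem

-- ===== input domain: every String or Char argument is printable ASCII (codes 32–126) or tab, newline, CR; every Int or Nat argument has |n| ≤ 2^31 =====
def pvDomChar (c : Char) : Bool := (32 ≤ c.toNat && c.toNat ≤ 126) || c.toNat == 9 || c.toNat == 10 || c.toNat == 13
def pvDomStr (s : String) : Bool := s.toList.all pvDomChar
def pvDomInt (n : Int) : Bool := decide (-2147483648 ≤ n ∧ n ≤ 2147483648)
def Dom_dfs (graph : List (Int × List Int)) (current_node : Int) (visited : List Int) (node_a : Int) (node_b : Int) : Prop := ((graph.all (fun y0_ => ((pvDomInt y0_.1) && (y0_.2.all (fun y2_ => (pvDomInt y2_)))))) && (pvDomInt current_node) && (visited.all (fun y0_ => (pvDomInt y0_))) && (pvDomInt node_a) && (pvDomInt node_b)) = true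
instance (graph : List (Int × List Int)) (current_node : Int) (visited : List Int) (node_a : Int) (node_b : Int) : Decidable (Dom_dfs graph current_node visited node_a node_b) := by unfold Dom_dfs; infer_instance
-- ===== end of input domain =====

-- B replaces A's recursive DFS by an iterative DFS over an explicit stack (same preorder,
-- hence the same mutation of `visited` — the theorems below are about the RETURN value).

-- ===== PORT A =====
-- A is recursive and mutates `visited`; the port threads the set through and returns it
-- alongside the Bool.  `none` = KeyError on graph[...] or fuel exhaustion; fuel is only a
-- totality guard, decremented once per newly visited node, so `graph.length + 1` never
-- runs out (proved in the lemmas below).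
mutual
def dfsGoA (graph : List (Int × List Int)) (node_a node_b : Int) :
    Nat → Int → PySem.Set Int → Option (Bool × PySem.Set Int)
  | f, c, v =>
    if PySem.Set.contains v c then some (false, v)          -- if current_node in visited: return False
    else
      match f with
      | 0 => none
      | f + 1 =>
        let v1 := PySem.Set.add v c                          -- visited.add(current_node)
        if PySem.Set.contains v1 node_a && PySem.Set.contains v1 node_b then some (true, v1)
        else
          match (PySem.Dict.mk graph).get? c with            -- adj_list = graph[current_node]
          | none => none                                     -- KeyError
          | some adj => dfsLoopA graph node_a node_b f adj v1
termination_by f c v => (f, 0)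
def dfsLoopA (graph : List (Int × List Int)) (node_a node_b : Int) :
    Nat → List Int → PySem.Set Int → Option (Bool × PySem.Set Int)
  | _, [], v => some (false, v)                              -- return False (loop done)
  | f, x :: xs, v =>
    match dfsGoA graph node_a node_b f x v with              -- if dfs(graph, adj, …):
    | none => none
    | some (r, v') => if r then some (true, v') else dfsLoopA graph node_a node_b f xs v'
termination_by f l v => (f, l.length + 1)
end

def dfs (graph : List (Int × List Int)) (current_node : Int) (visited : List Int) (node_a : Int) (node_b : Int) : Bool :=
  match dfsGoA graph node_a node_b (graph.length + 1) current_node visited with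
  | some (r, _) => r
  | none => false

-- ===== PORT B =====
-- stack represented top-first (head = top), so pop = head and
-- stack.extend(reversed(adj)) followed by pops = adj ++ rest.
-- Fuel is decremented once per newly visited node (totality guard only).
def dfsRunB (graph : List (Int × List Int)) (node_a node_b : Int) :
    Nat → List Int → PySem.Set Int → Option Bool
  | _, [], _ => some false                                   -- while stack exhausted: return False
  | f, n :: rest, v =>
    if PySem.Set.contains v n then dfsRunB graph node_a node_b f rest v   -- continue
    else
      match f with
      | 0 => none
      | f + 1 =>
        let v1 := PySem.Set.add v n                          -- visited.add(node)
        if PySem.Set.contains v1 node_a && PySem.Set.contains v1 node_b then some true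
        else
          match (PySem.Dict.mk graph).get? n with            -- adj_list = graph[node]
          | none => none                                     -- KeyError
          | some adj => dfsRunB graph node_a node_b f (adj ++ rest) v1
termination_by f s v => (f, s.length)

def dfs_alt (graph : List (Int × List Int)) (current_node : Int) (visited : List Int) (node_a : Int) (node_b : Int) : Bool :=
  (dfsRunB graph node_a node_b (graph.length + 1) [current_node] visited).getD false

-- ===== PRECONDITION & SPEC =====
-- A raises KeyError (graph[n] on a missing key) whenever the DFS reaches a node that is not
-- a key of graph before returning.  Pre_ admits the closed-form safe cases: current_node
-- already visited, the immediate-True case, or a well-formed graph (every adjacency target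
-- is a key) entered at a key.  This is narrower than "A returns": it also excludes graphs
-- whose closure violation sits in a part the DFS never reaches (see the cites in claim.json).
def Pre_dfs (graph : List (Int × List Int)) (current_node : Int) (visited : List Int) (node_a : Int) (node_b : Int) : Prop :=
  current_node ∈ visited ∨
  (current_node ∉ visited ∧ (node_a = current_node ∨ node_a ∈ visited) ∧ (node_b = current_node ∨ node_b ∈ visited)) ∨
  (current_node ∈ graph.map Prod.fst ∧ ∀ p ∈ graph, ∀ x ∈ p.2, x ∈ graph.map Prod.fst)
instance (graph : List (Int × List Int)) (current_node : Int) (visited : List Int) (node_a : Int) (node_b : Int) : Decidable (Pre_dfs graph current_node visited node_a node_b) := by unfold Pre_dfs; infer_instance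

def pvWitness_dfs : (List (Int × List Int)) × Int × List Int × Int × Int :=
  ([(0, [1, 2]), (1, [0]), (2, [])], 0, [], 1, 2)

def Spec_dfs (graph : List (Int × List Int)) (current_node : Int) (visited : List Int) (node_a : Int) (node_b : Int) (out : Bool) : Prop := out = dfs_alt graph current_node visited node_a node_b
instance (graph : List (Int × List Int)) (current_node : Int) (visited : List Int) (node_a : Int) (node_b : Int) (out : Bool) : Decidable (Spec_dfs graph current_node visited node_a node_b out) := by unfold Spec_dfs; infer_instance

-- ===== CLAIM (what is proved, stated in full; the proofs are below) =====
def Claim_equal_dfs : Prop := ∀ (graph : List (Int × List Int)) (current_node : Int) (visited : List Int) (node_a : Int) (node_b : Int), Dom_dfs graph current_node visited node_a node_b → Pre_dfs graph current_node visited node_a node_b → Spec_dfs graph current_node visited node_a node_b (dfs graph current_node visited node_a node_b)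

-- ===== LEMMAS AND PROOFS =====

theorem pv_not_mem_of_contains_false {v : PySem.Set Int} {c : Int}
    (h : PySem.Set.contains v c = false) : c ∉ v := by
  intro hm
  rw [(PySem.Set.contains_iff v c).mpr hm] at h
  cases h

-- branch-level unfolding lemmas for the three recursors
theorem pv_goA_mem (g : List (Int × List Int)) (a b : Int) (f : Nat) (c : Int) (v : PySem.Set Int)
    (h : PySem.Set.contains v c = true) : dfsGoA g a b f c v = some (false, v) := by
  have hm : c ∈ v := (PySem.Set.contains_iff v c).mp h
  rw [dfsGoA.eq_def]; simp [hm]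

theorem pv_goA_zero (g : List (Int × List Int)) (a b : Int) (c : Int) (v : PySem.Set Int)
    (h : PySem.Set.contains v c = false) : dfsGoA g a b 0 c v = none := by
  have hm : c ∉ v := pv_not_mem_of_contains_false h
  rw [dfsGoA.eq_def]; simp [hm]

theorem pv_goA_visit (g : List (Int × List Int)) (a b : Int) (f : Nat) (c : Int) (v : PySem.Set Int)
    (h : PySem.Set.contains v c = false) :
    dfsGoA g a b (f + 1) c v =
      (if PySem.Set.contains (PySem.Set.add v c) a && PySem.Set.contains (PySem.Set.add v c) b
       then some (true, PySem.Set.add v c)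
       else match (PySem.Dict.mk g).get? c with
            | none => none
            | some adj => dfsLoopA g a b f adj (PySem.Set.add v c)) := by
  have hm : c ∉ v := pv_not_mem_of_contains_false h
  rw [dfsGoA.eq_def]; simp [hm]

theorem pv_loopA_nil (g : List (Int × List Int)) (a b : Int) (f : Nat) (v : PySem.Set Int) :
    dfsLoopA g a b f [] v = some (false, v) := by
  rw [dfsLoopA.eq_def]

theorem pv_loopA_cons (g : List (Int × List Int)) (a b : Int) (f : Nat) (x : Int) (xs : List Int) (v : PySem.Set Int) :
    dfsLoopA g a b f (x :: xs) v =
      (match dfsGoA g a b f x v with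
       | none => none
       | some (r, v') => if r then some (true, v') else dfsLoopA g a b f xs v') := by
  rw [dfsLoopA.eq_def]

theorem pv_runB_nil (g : List (Int × List Int)) (a b : Int) (f : Nat) (v : PySem.Set Int) :
    dfsRunB g a b f [] v = some false := by
  rw [dfsRunB.eq_def]

theorem pv_runB_skip (g : List (Int × List Int)) (a b : Int) (f : Nat) (n : Int) (rest : List Int) (v : PySem.Set Int)
    (h : PySem.Set.contains v n = true) :
    dfsRunB g a b f (n :: rest) v = dfsRunB g a b f rest v := by
  have hm : n ∈ v := (PySem.Set.contains_iff v n).mp h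
  rw [dfsRunB.eq_def]; simp [hm]

theorem pv_runB_zero (g : List (Int × List Int)) (a b : Int) (n : Int) (rest : List Int) (v : PySem.Set Int)
    (h : PySem.Set.contains v n = false) :
    dfsRunB g a b 0 (n :: rest) v = none := by
  have hm : n ∉ v := pv_not_mem_of_contains_false h
  rw [dfsRunB.eq_def]; simp [hm]

theorem pv_runB_visit (g : List (Int × List Int)) (a b : Int) (f : Nat) (n : Int) (rest : List Int) (v : PySem.Set Int)
    (h : PySem.Set.contains v n = false) :
    dfsRunB g a b (f + 1) (n :: rest) v =
      (if PySem.Set.contains (PySem.Set.add v n) a && PySem.Set.contains (PySem.Set.add v n) b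
       then some true
       else match (PySem.Dict.mk g).get? n with
            | none => none
            | some adj => dfsRunB g a b f (adj ++ rest) (PySem.Set.add v n)) := by
  have hm : n ∉ v := pv_not_mem_of_contains_false h
  rw [dfsRunB.eq_def]; simp [hm]

-- dict helpers
theorem pv_get?_mem (g : List (Int × List Int)) (c : Int) (adj : List Int)
    (h : (PySem.Dict.mk g).get? c = some adj) : (c, adj) ∈ g := by
  induction g with
  | nil => simp [PySem.Dict.get?] at h
  | cons p rest ih =>
    obtain ⟨k, vv⟩ := p
    rw [PySem.Dict.get?_mk_cons] at h
    by_cases hk : k = c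
    · subst hk; simp at h; simp [h]
    · simp [hk] at h
      exact List.mem_cons_of_mem _ (ih h)

theorem pv_get?_isSome (g : List (Int × List Int)) (c : Int)
    (h : c ∈ g.map Prod.fst) : ((PySem.Dict.mk g).get? c).isSome := by
  induction g with
  | nil => simp at h
  | cons p rest ih =>
    obtain ⟨k, vv⟩ := p
    rw [PySem.Dict.get?_mk_cons]
    by_cases hk : k = c
    · simp [hk]
    · simp [hk]
      simp at h
      rcases h with h | h
      · exact absurd h.symm hk
      · exact ih (by simpa using h)

-- growth: the visited set is only appended to
theorem pv_growth (g : List (Int × List Int)) (a b : Int) :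
    ∀ f : Nat,
      (∀ c v r v', dfsGoA g a b f c v = some (r, v') → ∃ w, v' = v ++ w) ∧
      (∀ s v r v', dfsLoopA g a b f s v = some (r, v') → ∃ w, v' = v ++ w) := by
  intro f
  induction f with
  | zero =>
    have hgo : ∀ c v r v', dfsGoA g a b 0 c v = some (r, v') → ∃ w, v' = v ++ w := by
      intro c v r v' h
      cases hcv : PySem.Set.contains v c with
      | true => rw [pv_goA_mem g a b 0 c v hcv] at h; simp at h; exact ⟨[], by simp [h.2]⟩
      | false => rw [pv_goA_zero g a b c v hcv] at h; cases h
    refine ⟨hgo, ?_⟩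
    intro s
    induction s with
    | nil => intro v r v' h; rw [pv_loopA_nil] at h; simp at h; exact ⟨[], by simp [h.2]⟩
    | cons x xs ih =>
      intro v r v' h
      rw [pv_loopA_cons] at h
      cases hg : dfsGoA g a b 0 x v with
      | none => rw [hg] at h; cases h
      | some p =>
        obtain ⟨rx, vx⟩ := p
        rw [hg] at h
        obtain ⟨w1, hw1⟩ := hgo x v rx vx hg
        cases rx with
        | true => simp at h; exact ⟨w1, by rw [← h.2, hw1]⟩
        | false =>
          simp at h
          obtain ⟨w2, hw2⟩ := ih vx r v' h
          exact ⟨w1 ++ w2, by rw [hw2, hw1, List.append_assoc]⟩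
  | succ f ihf =>
    have hgo : ∀ c v r v', dfsGoA g a b (f + 1) c v = some (r, v') → ∃ w, v' = v ++ w := by
      intro c v r v' h
      cases hcv : PySem.Set.contains v c with
      | true => rw [pv_goA_mem g a b (f + 1) c v hcv] at h; simp at h; exact ⟨[], by simp [h.2]⟩
      | false =>
        rw [pv_goA_visit g a b f c v hcv] at h
        rw [PySem.Set.add_of_not_mem (pv_not_mem_of_contains_false hcv)] at h
        cases hab : (PySem.Set.contains (v ++ [c]) a && PySem.Set.contains (v ++ [c]) b) with
        | true => rw [hab] at h; simp at h; exact ⟨[c], h.2.symm⟩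
        | false =>
          rw [hab] at h
          simp only [Bool.false_eq_true, if_false] at h
          cases hl : (PySem.Dict.mk g).get? c with
          | none => rw [hl] at h; cases h
          | some adj =>
            rw [hl] at h
            obtain ⟨w1, hw1⟩ := ihf.2 adj (v ++ [c]) r v' h
            exact ⟨c :: w1, by rw [hw1]; simp⟩
    refine ⟨hgo, ?_⟩
    intro s
    induction s with
    | nil => intro v r v' h; rw [pv_loopA_nil] at h; simp at h; exact ⟨[], by simp [h.2]⟩
    | cons x xs ih =>
      intro v r v' h
      rw [pv_loopA_cons] at h
      cases hg : dfsGoA g a b (f + 1) x v with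
      | none => rw [hg] at h; cases h
      | some p =>
        obtain ⟨rx, vx⟩ := p
        rw [hg] at h
        obtain ⟨w1, hw1⟩ := hgo x v rx vx hg
        cases rx with
        | true => simp at h; exact ⟨w1, by rw [← h.2, hw1]⟩
        | false =>
          simp at h
          obtain ⟨w2, hw2⟩ := ih vx r v' h
          exact ⟨w1 ++ w2, by rw [hw2, hw1, List.append_assoc]⟩

-- shape: under a closed graph entered at keys, the newly visited nodes are fresh distinct keys
theorem pv_shape (g : List (Int × List Int)) (a b : Int)
    (hc : ∀ p ∈ g, ∀ x ∈ p.2, x ∈ g.map Prod.fst) :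
    ∀ f : Nat,
      (∀ c v r v', c ∈ g.map Prod.fst → dfsGoA g a b f c v = some (r, v') →
        ∃ w, v' = v ++ w ∧ w.Nodup ∧ (∀ x ∈ w, x ∉ v) ∧ (∀ x ∈ w, x ∈ g.map Prod.fst)) ∧
      (∀ s v r v', (∀ x ∈ s, x ∈ g.map Prod.fst) → dfsLoopA g a b f s v = some (r, v') →
        ∃ w, v' = v ++ w ∧ w.Nodup ∧ (∀ x ∈ w, x ∉ v) ∧ (∀ x ∈ w, x ∈ g.map Prod.fst)) := by
  intro f
  induction f with
  | zero =>
    have hgo : ∀ c v r v', c ∈ g.map Prod.fst → dfsGoA g a b 0 c v = some (r, v') →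
        ∃ w, v' = v ++ w ∧ w.Nodup ∧ (∀ x ∈ w, x ∉ v) ∧ (∀ x ∈ w, x ∈ g.map Prod.fst) := by
      intro c v r v' _ h
      cases hcv : PySem.Set.contains v c with
      | true => rw [pv_goA_mem g a b 0 c v hcv] at h; simp at h; exact ⟨[], by simp [h.2]⟩
      | false => rw [pv_goA_zero g a b c v hcv] at h; cases h
    refine ⟨hgo, ?_⟩
    intro s
    induction s with
    | nil =>
      intro v r v' _ h; rw [pv_loopA_nil] at h; simp at h; exact ⟨[], by simp [h.2]⟩
    | cons x xs ih =>
      intro v r v' hk h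
      rw [pv_loopA_cons] at h
      cases hg : dfsGoA g a b 0 x v with
      | none => rw [hg] at h; cases h
      | some p =>
        obtain ⟨rx, vx⟩ := p
        rw [hg] at h
        obtain ⟨w1, hw1, hn1, hd1, hk1⟩ := hgo x v rx vx (hk x (by simp)) hg
        cases rx with
        | true => simp at h; exact ⟨w1, by rw [← h.2]; exact hw1, hn1, hd1, hk1⟩
        | false =>
          simp at h
          obtain ⟨w2, hw2, hn2, hd2, hk2⟩ := ih vx r v' (fun y hy => hk y (by simp [hy])) h
          subst hw1
          refine ⟨w1 ++ w2, by rw [hw2, List.append_assoc], ?_, ?_, ?_⟩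
          · refine List.Nodup.append hn1 hn2 ?_
            intro y hy1 hy2
            exact hd2 y hy2 (by simp [hy1])
          · intro y hy; rcases List.mem_append.mp hy with h1 | h1
            · exact hd1 y h1
            · intro hv; exact hd2 y h1 (by simp [hv])
          · intro y hy; rcases List.mem_append.mp hy with h1 | h1
            · exact hk1 y h1
            · exact hk2 y h1
  | succ f ihf =>
    have hgo : ∀ c v r v', c ∈ g.map Prod.fst → dfsGoA g a b (f + 1) c v = some (r, v') →
        ∃ w, v' = v ++ w ∧ w.Nodup ∧ (∀ x ∈ w, x ∉ v) ∧ (∀ x ∈ w, x ∈ g.map Prod.fst) := by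
      intro c v r v' hck h
      cases hcv : PySem.Set.contains v c with
      | true => rw [pv_goA_mem g a b (f + 1) c v hcv] at h; simp at h; exact ⟨[], by simp [h.2]⟩
      | false =>
        have hnm : c ∉ v := pv_not_mem_of_contains_false hcv
        rw [pv_goA_visit g a b f c v hcv, PySem.Set.add_of_not_mem hnm] at h
        cases hab : (PySem.Set.contains (v ++ [c]) a && PySem.Set.contains (v ++ [c]) b) with
        | true =>
          rw [hab] at h; simp at h
          refine ⟨[c], h.2.symm, by simp, ?_, ?_⟩
          · intro y hy; rcases List.mem_singleton.mp hy; exact hnm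
          · intro y hy; rcases List.mem_singleton.mp hy; exact hck
        | false =>
          rw [hab] at h
          simp only [Bool.false_eq_true, if_false] at h
          cases hl : (PySem.Dict.mk g).get? c with
          | none => rw [hl] at h; cases h
          | some adj =>
            rw [hl] at h
            have hadjk : ∀ x ∈ adj, x ∈ g.map Prod.fst :=
              fun x hx => hc (c, adj) (pv_get?_mem g c adj hl) x hx
            obtain ⟨w1, hw1, hn1, hd1, hk1⟩ := ihf.2 adj (v ++ [c]) r v' hadjk h
            refine ⟨c :: w1, by rw [hw1]; simp, ?_, ?_, ?_⟩
            · refine List.nodup_cons.mpr ⟨?_, hn1⟩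
              intro hcw; exact hd1 c hcw (by simp)
            · intro y hy
              rcases List.mem_cons.mp hy with h1 | h1
              · subst h1; exact hnm
              · intro hv; exact hd1 y h1 (by simp [hv])
            · intro y hy
              rcases List.mem_cons.mp hy with h1 | h1
              · subst h1; exact hck
              · exact hk1 y h1
    refine ⟨hgo, ?_⟩
    intro s
    induction s with
    | nil =>
      intro v r v' _ h; rw [pv_loopA_nil] at h; simp at h; exact ⟨[], by simp [h.2]⟩
    | cons x xs ih =>
      intro v r v' hk h
      rw [pv_loopA_cons] at h
      cases hg : dfsGoA g a b (f + 1) x v with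
      | none => rw [hg] at h; cases h
      | some p =>
        obtain ⟨rx, vx⟩ := p
        rw [hg] at h
        obtain ⟨w1, hw1, hn1, hd1, hk1⟩ := hgo x v rx vx (hk x (by simp)) hg
        cases rx with
        | true => simp at h; exact ⟨w1, by rw [← h.2]; exact hw1, hn1, hd1, hk1⟩
        | false =>
          simp at h
          obtain ⟨w2, hw2, hn2, hd2, hk2⟩ := ih vx r v' (fun y hy => hk y (by simp [hy])) h
          subst hw1
          refine ⟨w1 ++ w2, by rw [hw2, List.append_assoc], ?_, ?_, ?_⟩
          · refine List.Nodup.append hn1 hn2 ?_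
            intro y hy1 hy2
            exact hd2 y hy2 (by simp [hy1])
          · intro y hy; rcases List.mem_append.mp hy with h1 | h1
            · exact hd1 y h1
            · intro hv; exact hd2 y h1 (by simp [hv])
          · intro y hy; rcases List.mem_append.mp hy with h1 | h1
            · exact hk1 y h1
            · exact hk2 y h1

-- fuel monotonicity for B's loop
theorem pv_monoB (g : List (Int × List Int)) (a b : Int) :
    ∀ f : Nat, ∀ s v x, dfsRunB g a b f s v = some x → dfsRunB g a b (f + 1) s v = some x := by
  intro f
  induction f with
  | zero =>
    intro s
    induction s with
    | nil => intro v x h; rw [pv_runB_nil] at h; rw [pv_runB_nil]; exact h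
    | cons n rest ih =>
      intro v x h
      cases hcv : PySem.Set.contains v n with
      | true =>
        rw [pv_runB_skip g a b 0 n rest v hcv] at h
        rw [pv_runB_skip g a b 1 n rest v hcv]
        exact ih v x h
      | false => rw [pv_runB_zero g a b n rest v hcv] at h; cases h
  | succ f ihf =>
    intro s
    induction s with
    | nil => intro v x h; rw [pv_runB_nil] at h; rw [pv_runB_nil]; exact h
    | cons n rest ih =>
      intro v x h
      cases hcv : PySem.Set.contains v n with
      | true =>
        rw [pv_runB_skip g a b (f + 1) n rest v hcv] at h
        rw [pv_runB_skip g a b (f + 2) n rest v hcv]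
        exact ih v x h
      | false =>
        rw [pv_runB_visit g a b f n rest v hcv] at h
        rw [pv_runB_visit g a b (f + 1) n rest v hcv]
        cases hab : (PySem.Set.contains (PySem.Set.add v n) a && PySem.Set.contains (PySem.Set.add v n) b) with
        | true => rw [hab] at h; exact h
        | false =>
          rw [hab] at h
          simp only [Bool.false_eq_true, if_false] at h ⊢
          cases hl : (PySem.Dict.mk g).get? n with
          | none => rw [hl] at h; cases h
          | some adj =>
            rw [hl] at h
            exact ihf (adj ++ rest) (PySem.Set.add v n) x h

theorem pv_monoB_le (g : List (Int × List Int)) (a b : Int) {f f' : Nat} (hle : f ≤ f') :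
    ∀ s v x, dfsRunB g a b f s v = some x → dfsRunB g a b f' s v = some x := by
  induction hle with
  | refl => intro s v x h; exact h
  | step _ ih => intro s v x h; exact pv_monoB g a b _ s v x (ih s v x h)

-- the measure: keys of the graph not yet visited
def pvU (g : List (Int × List Int)) (v : List Int) : Nat :=
  ((g.map Prod.fst).toFinset \ v.toFinset).card

theorem pvU_visit (g : List (Int × List Int)) (v : List Int) (c : Int)
    (hck : c ∈ g.map Prod.fst) (hnm : c ∉ v) : pvU g (v ++ [c]) < pvU g v := by
  unfold pvU
  apply Finset.card_lt_card
  rw [Finset.ssubset_iff_of_subset]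
  · exact ⟨c, by simp [hck, hnm], by simp⟩
  · intro y hy
    simp at hy ⊢
    tauto

theorem pvU_mono (g : List (Int × List Int)) (v w : List Int) :
    pvU g (v ++ w) ≤ pvU g v := by
  unfold pvU
  apply Finset.card_le_card
  intro y hy
  simp at hy ⊢
  exact ⟨hy.1, hy.2.1⟩

-- adequacy of A's fuel: with fuel above the measure the port never runs out
theorem pv_adeqA (g : List (Int × List Int)) (a b : Int)
    (hc : ∀ p ∈ g, ∀ x ∈ p.2, x ∈ g.map Prod.fst) :
    ∀ f : Nat,
      (∀ c v, c ∈ g.map Prod.fst → pvU g v < f → (dfsGoA g a b f c v).isSome) ∧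
      (∀ s v, (∀ x ∈ s, x ∈ g.map Prod.fst) → pvU g v < f → (dfsLoopA g a b f s v).isSome) := by
  intro f
  induction f with
  | zero => exact ⟨fun c v _ h => absurd h (by omega), fun s v _ h => absurd h (by omega)⟩
  | succ f ihf =>
    have hgo : ∀ c v, c ∈ g.map Prod.fst → pvU g v < f + 1 → (dfsGoA g a b (f + 1) c v).isSome := by
      intro c v hck hU
      cases hcv : PySem.Set.contains v c with
      | true => rw [pv_goA_mem g a b (f + 1) c v hcv]; rfl
      | false =>
        have hnm : c ∉ v := pv_not_mem_of_contains_false hcv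
        rw [pv_goA_visit g a b f c v hcv, PySem.Set.add_of_not_mem hnm]
        cases hab : (PySem.Set.contains (v ++ [c]) a && PySem.Set.contains (v ++ [c]) b) with
        | true => rfl
        | false =>
          simp only [Bool.false_eq_true, if_false]
          cases hl : (PySem.Dict.mk g).get? c with
          | none =>
            have hs := pv_get?_isSome g c hck
            rw [hl] at hs; cases hs
          | some adj =>
            have hadjk : ∀ x ∈ adj, x ∈ g.map Prod.fst :=
              fun x hx => hc (c, adj) (pv_get?_mem g c adj hl) x hx
            have hU' : pvU g (v ++ [c]) < f := by
              have := pvU_visit g v c hck hnm; omega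
            exact ihf.2 adj (v ++ [c]) hadjk hU'
    refine ⟨hgo, ?_⟩
    intro s
    induction s with
    | nil => intro v _ _; rw [pv_loopA_nil]; rfl
    | cons x xs ih =>
      intro v hk hU
      rw [pv_loopA_cons]
      cases hg : dfsGoA g a b (f + 1) x v with
      | none =>
        have hs := hgo x v (hk x (by simp)) hU
        rw [hg] at hs; cases hs
      | some p =>
        obtain ⟨rx, vx⟩ := p
        cases rx with
        | true => rfl
        | false =>
          simp only [Bool.false_eq_true, if_false]
          obtain ⟨w, hw⟩ := (pv_growth g a b (f + 1)).1 x v false vx hg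
          subst hw
          exact ih (v ++ w) (fun y hy => hk y (by simp [hy]))
            (lt_of_le_of_lt (pvU_mono g v w) hU)

-- simulation: B's stack loop runs A's loop body-for-body (same preorder, fuel = new visits)
theorem pv_sim (g : List (Int × List Int)) (a b : Int) :
    ∀ f : Nat, ∀ s v rest r v' w fC,
      dfsLoopA g a b f s v = some (r, v') → v' = v ++ w →
      dfsRunB g a b (w.length + fC) (s ++ rest) v =
        (if r then some true else dfsRunB g a b fC rest v') := by
  intro f
  induction f with
  | zero =>
    intro s
    induction s with
    | nil =>
      intro v rest r v' w fC hL hw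
      rw [pv_loopA_nil] at hL; simp at hL
      obtain ⟨hr, hv⟩ := hL
      subst hr
      subst hv
      have hwnil : w = [] := by
        have hvv : v ++ ([] : List Int) = v ++ w := by simpa using hw
        simpa using (List.append_cancel_left hvv).symm
      subst hwnil
      simp
    | cons c ss ih =>
      intro v rest r v' w fC hL hw
      rw [pv_loopA_cons] at hL
      cases hg : dfsGoA g a b 0 c v with
      | none => rw [hg] at hL; cases hL
      | some p =>
        obtain ⟨rc, vc⟩ := p
        rw [hg] at hL
        cases hcv : PySem.Set.contains v c with
        | false => rw [pv_goA_zero g a b c v hcv] at hg; cases hg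
        | true =>
          rw [pv_goA_mem g a b 0 c v hcv] at hg
          simp at hg
          obtain ⟨hrc, hvc⟩ := hg
          subst hrc; subst hvc
          simp only [Bool.false_eq_true, if_false] at hL
          rw [List.cons_append, pv_runB_skip g a b (w.length + fC) c (ss ++ rest) v hcv]
          exact ih v rest r v' w fC hL hw
  | succ f ihf =>
    intro s
    induction s with
    | nil =>
      intro v rest r v' w fC hL hw
      rw [pv_loopA_nil] at hL; simp at hL
      obtain ⟨hr, hv⟩ := hL
      subst hr
      subst hv
      have hwnil : w = [] := by
        have hvv : v ++ ([] : List Int) = v ++ w := by simpa using hw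
        simpa using (List.append_cancel_left hvv).symm
      subst hwnil
      simp
    | cons c ss ih =>
      intro v rest r v' w fC hL hw
      rw [pv_loopA_cons] at hL
      cases hg : dfsGoA g a b (f + 1) c v with
      | none => rw [hg] at hL; cases hL
      | some p =>
        obtain ⟨rc, vc⟩ := p
        rw [hg] at hL
        cases hcv : PySem.Set.contains v c with
        | true =>
          rw [pv_goA_mem g a b (f + 1) c v hcv] at hg
          simp at hg
          obtain ⟨hrc, hvc⟩ := hg
          subst hrc; subst hvc
          simp only [Bool.false_eq_true, if_false] at hL
          rw [List.cons_append, pv_runB_skip g a b (w.length + fC) c (ss ++ rest) v hcv]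
          exact ih v rest r v' w fC hL hw
        | false =>
          have hnm : c ∉ v := pv_not_mem_of_contains_false hcv
          rw [pv_goA_visit g a b f c v hcv, PySem.Set.add_of_not_mem hnm] at hg
          cases hab : (PySem.Set.contains (v ++ [c]) a && PySem.Set.contains (v ++ [c]) b) with
          | true =>
            rw [hab] at hg; simp at hg
            obtain ⟨hrc, hvc⟩ := hg
            subst hrc
            simp at hL
            obtain ⟨hr, hv'⟩ := hL
            subst hr
            have hwc : w = [c] := by
              have hvv : v ++ w = v ++ [c] := by rw [← hw, ← hv', ← hvc]
              exact List.append_cancel_left hvv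
            subst hwc
            have harith : ([c] : List Int).length + fC = fC + 1 := by simp; omega
            rw [harith, List.cons_append,
              pv_runB_visit g a b fC c (ss ++ rest) v hcv,
              PySem.Set.add_of_not_mem hnm, hab]
            simp
          | false =>
            rw [hab] at hg
            simp only [Bool.false_eq_true, if_false] at hg
            cases hl : (PySem.Dict.mk g).get? c with
            | none => rw [hl] at hg; cases hg
            | some adj =>
              rw [hl] at hg
              obtain ⟨w1, hw1⟩ := (pv_growth g a b f).2 adj (v ++ [c]) rc vc hg
              cases rc with
              | true =>
                simp at hL
                obtain ⟨hr, hv'⟩ := hL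
                subst hr
                have hwc : w = c :: w1 := by
                  have hvv : v ++ w = v ++ (c :: w1) := by
                    rw [← hw, ← hv', hw1]; simp
                  exact List.append_cancel_left hvv
                subst hwc
                have harith : (c :: w1).length + fC = (w1.length + fC) + 1 := by simp; omega
                rw [harith, List.cons_append,
                  pv_runB_visit g a b (w1.length + fC) c (ss ++ rest) v hcv,
                  PySem.Set.add_of_not_mem hnm, hab]
                simp only [Bool.false_eq_true, if_false]
                rw [hl]
                have hstep := ihf adj (v ++ [c]) (ss ++ rest) true vc w1 fC hg hw1
                simp only [if_true] at hstep
                exact hstep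
              | false =>
                simp only [Bool.false_eq_true, if_false] at hL
                obtain ⟨w2, hw2⟩ := (pv_growth g a b (f + 1)).2 ss vc r v' hL
                have hwc : w = c :: (w1 ++ w2) := by
                  have hvv : v ++ w = v ++ (c :: (w1 ++ w2)) := by
                    rw [← hw, hw2, hw1]; simp
                  exact List.append_cancel_left hvv
                subst hwc
                have harith : (c :: (w1 ++ w2)).length + fC = (w1.length + (w2.length + fC)) + 1 := by
                  simp; omega
                rw [harith, List.cons_append,
                  pv_runB_visit g a b (w1.length + (w2.length + fC)) c (ss ++ rest) v hcv,
                  PySem.Set.add_of_not_mem hnm, hab]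
                simp only [Bool.false_eq_true, if_false]
                rw [hl]
                have hstep := ihf adj (v ++ [c]) (ss ++ rest) false vc w1 (w2.length + fC) hg hw1
                simp only [Bool.false_eq_true, if_false] at hstep
                exact hstep.trans (ih vc rest r v' w2 fC hL hw2)

-- distinct keys are at most graph.length many
theorem pv_len_bound (g : List (Int × List Int)) (w : List Int)
    (hn : w.Nodup) (hk : ∀ x ∈ w, x ∈ g.map Prod.fst) : w.length ≤ g.length := by
  have h1 : w.toFinset.card = w.length := List.toFinset_card_of_nodup hn
  have h2 : w.toFinset ⊆ (g.map Prod.fst).toFinset := by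
    intro y hy
    rw [List.mem_toFinset] at hy ⊢
    exact hk y hy
  calc w.length = w.toFinset.card := h1.symm
    _ ≤ (g.map Prod.fst).toFinset.card := Finset.card_le_card h2
    _ ≤ (g.map Prod.fst).length := List.toFinset_card_le _
    _ = g.length := by simp

theorem pv_final : ∀ (graph : List (Int × List Int)) (current_node : Int) (visited : List Int) (node_a node_b : Int),
    Pre_dfs graph current_node visited node_a node_b →
    dfs graph current_node visited node_a node_b = dfs_alt graph current_node visited node_a node_b := by
  intro g c v a b hpre
  rcases hpre with hmem | ⟨hnm, ha, hb⟩ | ⟨hck, hc⟩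
  · -- current_node already visited: both return False immediately
    have hcv : PySem.Set.contains v c = true := (PySem.Set.contains_iff v c).mpr hmem
    have hgo : dfsGoA g a b (g.length + 1) c v = some (false, v) := pv_goA_mem g a b _ c v hcv
    have hrb : dfsRunB g a b (g.length + 1) [c] v = some false := by
      rw [pv_runB_skip g a b (g.length + 1) c [] v hcv, pv_runB_nil]
    unfold dfs dfs_alt
    rw [hgo, hrb]; rfl
  · -- immediate-True: node_a and node_b are both in visited ∪ {current_node}
    have hcv : PySem.Set.contains v c = false := by
      cases h : PySem.Set.contains v c
      · rfl
      · exact absurd ((PySem.Set.contains_iff v c).mp h) hnm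
    have hca : PySem.Set.contains (v ++ [c]) a = true :=
      (PySem.Set.contains_iff _ a).mpr (by rcases ha with h | h <;> simp [h])
    have hcb : PySem.Set.contains (v ++ [c]) b = true :=
      (PySem.Set.contains_iff _ b).mpr (by rcases hb with h | h <;> simp [h])
    have hgo : dfsGoA g a b (g.length + 1) c v = some (true, v ++ [c]) := by
      rw [pv_goA_visit g a b g.length c v hcv, PySem.Set.add_of_not_mem hnm, hca, hcb]
      simp
    have hrb : dfsRunB g a b (g.length + 1) [c] v = some true := by
      rw [pv_runB_visit g a b g.length c [] v hcv, PySem.Set.add_of_not_mem hnm, hca, hcb]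
      simp
    unfold dfs dfs_alt
    rw [hgo, hrb]; rfl
  · -- main case: well-formed graph entered at a key
    have hU : pvU g v < g.length + 1 := by
      have h1 : pvU g v ≤ (g.map Prod.fst).toFinset.card :=
        Finset.card_le_card Finset.sdiff_subset
      have h2 : (g.map Prod.fst).toFinset.card ≤ (g.map Prod.fst).length :=
        List.toFinset_card_le _
      rw [List.length_map] at h2
      omega
    have hsome := (pv_adeqA g a b hc (g.length + 1)).1 c v hck hU
    cases hgo : dfsGoA g a b (g.length + 1) c v with
    | none => rw [hgo] at hsome; cases hsome
    | some p =>
      obtain ⟨rA, v'⟩ := p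
      have hloop : dfsLoopA g a b (g.length + 1) [c] v = some (rA, v') := by
        rw [pv_loopA_cons, hgo]
        cases rA
        · simp only [Bool.false_eq_true, if_false]; rw [pv_loopA_nil]
        · simp
      obtain ⟨w, hw, hn, _, hk⟩ :=
        (pv_shape g a b hc (g.length + 1)).2 [c] v rA v'
          (by intro y hy; rcases List.mem_singleton.mp hy; exact hck) hloop
      have hlen : w.length ≤ g.length := pv_len_bound g w hn hk
      have hsim := pv_sim g a b (g.length + 1) [c] v [] rA v' w 0 hloop hw
      have hrb0 : dfsRunB g a b w.length [c] v = some rA := by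
        cases rA
        · simp only [Bool.false_eq_true, if_false, pv_runB_nil] at hsim
          simpa using hsim
        · simpa using hsim
      have hrb : dfsRunB g a b (g.length + 1) [c] v = some rA :=
        pv_monoB_le g a b (by omega) [c] v rA hrb0
      unfold dfs dfs_alt
      rw [hgo, hrb]; rfl

-- ===== VERDICT (by name: the statement is the Claim_ definition above) =====
theorem dfs_spec : Claim_equal_dfs := by
  intro g c v a b _ hpre
  unfold Spec_dfs
  exact pv_final g c v a b hpre
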